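-- pv_equiv track=rewrite | github.com/ravenholm462/csttool | scripts/compare_outputs.py | _filter_expected_diffs
-- ===== SOURCE A (Python) =====
-- def _filter_expected_diffs(flat: dict, expected_paths: set) -> dict:
--     """Remove keys that match expected-to-differ paths."""
--     filtered = {}
--     for key, val in flat.items():
--         skip = False
--         for ep in expected_paths:
--             if key == ep or key.startswith(ep + "."):
--                 skip = True
--                 break
--         if not skip:
--             filtered[key] = val
--     return filtered
-- ===== SOURCE B (Python) =====
-- def _filter_expected_diffs(flat: dict, expected_paths: set) -> dict:
--     """Remove keys that match expected-to-differ paths."""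
--     eps = set(expected_paths)
--
--     def dropped(key):
--         if key in eps:
--             return True
--         for i, ch in enumerate(key):
--             if ch == '.' and key[:i] in eps:
--                 return True
--         return False
--
--     return {k: v for k, v in flat.items() if not dropped(k)}
-- ===== Notes on version B (the rewrite author's own statement) =====
-- stated objective: faster
-- what changed: B replaces A's per-key linear scan over expected_paths with a hash-set of the paths built once, testing each key and each of its dot-terminated prefixes for set membership, so the inner scan over expected_paths disappears.
import Mathlib
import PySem

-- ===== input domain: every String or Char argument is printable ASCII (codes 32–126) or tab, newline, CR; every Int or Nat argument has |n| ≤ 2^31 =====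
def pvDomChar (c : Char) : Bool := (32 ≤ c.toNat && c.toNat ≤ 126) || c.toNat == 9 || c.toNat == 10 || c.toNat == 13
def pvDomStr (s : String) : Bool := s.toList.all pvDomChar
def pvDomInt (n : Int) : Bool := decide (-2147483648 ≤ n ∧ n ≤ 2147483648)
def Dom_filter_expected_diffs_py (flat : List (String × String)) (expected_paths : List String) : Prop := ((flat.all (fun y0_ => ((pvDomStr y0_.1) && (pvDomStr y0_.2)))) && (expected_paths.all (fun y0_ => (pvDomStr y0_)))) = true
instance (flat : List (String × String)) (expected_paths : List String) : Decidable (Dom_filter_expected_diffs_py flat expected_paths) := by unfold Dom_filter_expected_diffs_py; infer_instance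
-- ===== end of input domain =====

-- B inverts the matching: the expected paths go into a set once, and each key is
-- judged by looking up the key itself and each of its dot-terminated prefixes in
-- that set — no per-key scan over expected_paths (an alternative decomposition).

-- ===== PORT A =====
-- A builds `filtered` by inserting each kept (key, val); the input dict's keys are
-- unique, so each insert appends a fresh pair — ported as list append.
def filter_expected_diffs_py (flat : List (String × String)) (expected_paths : List String) : List (String × String) :=
  flat.foldl (fun filtered kv =>
    -- inner 'for ep … break' loop setting the `skip` flag = short-circuit any
    let skip := expected_paths.any (fun ep =>
      kv.1 == ep || PySem.Str.startswith kv.1 (ep ++ "."))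
    if !skip then filtered ++ [kv] else filtered) []

-- ===== PORT B =====
-- 'dropped(key)': key in eps, or key[:i] in eps for some '.' at position i
-- (the early-return 'for i, ch in enumerate(key)' loop is the .any)
def fedDropped (eps : PySem.Set String) (key : String) : Bool :=
  PySem.Set.contains eps key ||
    (PySem.List.enumerate key.toList).any (fun p =>
      p.2 == '.' && PySem.Set.contains eps (PySem.Str.slice key none (some p.1)))

def filter_expected_diffs_py_alt (flat : List (String × String)) (expected_paths : List String) : List (String × String) :=
  let eps := PySem.Set.ofList expected_paths
  -- dict comprehension over flat's items (unique keys) = list filter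
  flat.filter (fun kv => !fedDropped eps kv.1)

-- ===== PRECONDITION & SPEC =====
def Spec_filter_expected_diffs_py (flat : List (String × String)) (expected_paths : List String) (out : List (String × String)) : Prop := out = filter_expected_diffs_py_alt flat expected_paths
instance (flat : List (String × String)) (expected_paths : List String) (out : List (String × String)) : Decidable (Spec_filter_expected_diffs_py flat expected_paths out) := by unfold Spec_filter_expected_diffs_py; infer_instance

-- ===== CLAIM (what is proved, stated in full; the proofs are below) =====
def Claim_equal_filter_expected_diffs_py : Prop := ∀ (flat : List (String × String)) (expected_paths : List String), Dom_filter_expected_diffs_py flat expected_paths → Spec_filter_expected_diffs_py flat expected_paths (filter_expected_diffs_py flat expected_paths)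

-- ===== LEMMAS AND PROOFS =====

-- ep+"." is a prefix of key  ↔  key has a '.' at position k with key[:k] = ep
lemma fed_prefix_iff (cs es : List Char) :
    (es ++ ['.']) <+: cs ↔
      ∃ k, ∃ h : k < cs.length, cs[k] = '.' ∧ cs.take k = es := by
  constructor
  · rintro ⟨t, ht⟩
    refine ⟨es.length, ?_, ?_, ?_⟩
    · subst ht; simp
    · subst ht; simp
    · subst ht; simp
  · rintro ⟨k, hk, hdot, htake⟩
    have : cs.take (k + 1) = es ++ ['.'] := by
      rw [List.take_add_one, htake]
      simp [List.getElem?_eq_getElem hk, hdot]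
    rw [← this]
    exact List.take_prefix _ _

-- key[:k] as a list of chars
lemma fed_slice_toList (key : String) (k : Nat) :
    (PySem.Str.slice key none (some (k:Int))).toList = key.toList.take k := by
  rw [PySem.Str.toList_slice, PySem.Chars.slice_eq_listSlice,
    PySem.List.slice_to _ (by positivity)]
  simp

lemma fed_slice_eq_iff (key ep : String) (k : Nat) :
    PySem.Str.slice key none (some (k:Int)) = ep ↔ key.toList.take k = ep.toList := by
  rw [← fed_slice_toList key k, String.toList_inj]

-- the enumerate loop of fedDropped finds exactly the strict startswith matches
lemma fed_enum_any (eps : List String) (key : String) :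
    ((PySem.List.enumerate key.toList).any (fun p =>
        p.2 == '.' && PySem.Set.contains (PySem.Set.ofList eps)
          (PySem.Str.slice key none (some p.1))) = true) ↔
      ∃ ep ∈ eps, (ep.toList ++ ['.']) <+: key.toList := by
  simp only [List.any_eq_true, PySem.List.mem_enumerate_iff, Bool.and_eq_true,
    beq_iff_eq, PySem.Set.contains_iff, PySem.Set.mem_ofList]
  constructor
  · rintro ⟨p, ⟨k, hk, rfl⟩, hdot, hmem⟩
    simp only [zero_add] at hdot hmem
    refine ⟨_, hmem, ?_⟩
    rw [fed_prefix_iff]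
    exact ⟨k, hk, hdot, (fed_slice_toList key k).symm⟩
  · rintro ⟨ep, hep, hpre⟩
    rcases (fed_prefix_iff key.toList ep.toList).mp hpre with ⟨k, hk, hdot, htake⟩
    refine ⟨((k:Int), key.toList[k]), ⟨k, hk, by simp⟩, hdot, ?_⟩
    rw [(fed_slice_eq_iff key ep k).mpr htake]
    exact hep

-- per-key agreement of A's scan with B's set lookups
lemma fed_match_eq (eps : List String) (key : String) :
    eps.any (fun ep => key == ep || PySem.Str.startswith key (ep ++ ".")) =
      fedDropped (PySem.Set.ofList eps) key := by
  rw [Bool.eq_iff_iff]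
  unfold fedDropped
  rw [Bool.or_eq_true, fed_enum_any]
  simp only [List.any_eq_true, Bool.or_eq_true, beq_iff_eq,
    PySem.Set.contains_iff, PySem.Set.mem_ofList, PySem.Str.startswith_eq,
    PySem.Chars.startswith_iff]
  constructor
  · rintro ⟨ep, hep, rfl | h⟩
    · exact Or.inl hep
    · exact Or.inr ⟨ep, hep, by simpa using h⟩
  · rintro (h | ⟨ep, hep, h⟩)
    · exact ⟨key, h, Or.inl rfl⟩
    · exact ⟨ep, hep, Or.inr (by simpa using h)⟩

-- ===== VERDICT (by name: the statement is the Claim_ definition above) =====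
theorem filter_expected_diffs_py_spec : Claim_equal_filter_expected_diffs_py := by
  intro flat eps _
  unfold Spec_filter_expected_diffs_py filter_expected_diffs_py filter_expected_diffs_py_alt
  rw [PySem.List.foldl_append_if]
  simp only [List.nil_append, List.map_id']
  exact List.filter_congr (fun kv _ => by rw [fed_match_eq])
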